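-- pv_equiv track=rewrite | github.com/liuhanzuo/Mixture-of-Memory | scripts/eval_mag.py | _detect_ngram_repeat
-- ===== SOURCE A (Python) =====
-- def _detect_ngram_repeat(token_ids: list[int], n: int = 4) -> bool:
--     """检测是否出现 n-gram 重复循环。"""
--     if len(token_ids) < n * 3:
--         return False
--     # 检查最后 n 个 token 构成的 n-gram 是否在之前出现过 >= 2 次
--     last_ngram = tuple(token_ids[-n:])
--     count = 0
--     for i in range(len(token_ids) - n):
--         if tuple(token_ids[i:i+n]) == last_ngram:
--             count += 1
--     return count >= 3  # 同一个 n-gram 出现 3+ 次 = 循环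
-- ===== SOURCE B (Python) =====
-- def _detect_ngram_repeat(token_ids: list[int], n: int = 4) -> bool:
--     """检测是否出现 n-gram 重复循环。"""
--     if len(token_ids) < n * 3:
--         return False
--     pattern = token_ids[-n:]
--     # Bit-parallel Shift-And matcher: bit j of `state` is set iff the j+1 most
--     # recently scanned tokens equal pattern[:j+1]; bit n-1 set = a full window
--     # match.  No window is ever sliced or compared.
--     masks = {}
--     for j in range(n):
--         masks[pattern[j]] = masks.get(pattern[j], 0) | (1 << j)
--     accept = 1 << (n - 1)
--     state = 0
--     count = 0
--     for tok in token_ids[:-1]: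
--         state = ((state << 1) | 1) & masks.get(tok, 0)
--         if state & accept:
--             count += 1
--     return count >= 3
-- ===== Notes on version B (the rewrite author's own statement) =====
-- stated objective: alternative
-- what changed: Replaces A's slice-every-window-and-compare loop with the bit-parallel Shift-And string-matching algorithm: a per-token bitmask table is built from the last n-gram and a single integer automaton state is shifted along the sequence, counting accepting transitions, so no window is ever materialised or compared.
-- outside the precondition, e.g. on _detect_ngram_repeat([1, 2, 3], 0): A returns False, B raises ValueError; on _detect_ngram_repeat([0, 0], -4): A returns True, B raises ValueError
import Mathlib
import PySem

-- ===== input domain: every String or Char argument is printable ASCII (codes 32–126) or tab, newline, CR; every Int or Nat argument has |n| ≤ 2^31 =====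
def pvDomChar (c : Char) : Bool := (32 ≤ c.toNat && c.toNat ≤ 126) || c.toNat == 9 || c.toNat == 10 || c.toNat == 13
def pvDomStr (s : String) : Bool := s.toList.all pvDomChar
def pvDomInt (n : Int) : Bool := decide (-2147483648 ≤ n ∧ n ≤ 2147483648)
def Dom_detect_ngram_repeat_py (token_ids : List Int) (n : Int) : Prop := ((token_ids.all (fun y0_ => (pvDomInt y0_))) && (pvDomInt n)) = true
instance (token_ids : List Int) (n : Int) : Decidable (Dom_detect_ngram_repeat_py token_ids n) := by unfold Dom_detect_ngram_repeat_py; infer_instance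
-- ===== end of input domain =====

-- B replaces A's slice-every-window-and-compare loop with the bit-parallel Shift-And
-- string matcher (bitmask table + one automaton state scanned along the sequence).

-- ===== PORT A =====
-- literal port of A: slice every preceding window and compare it with the last n-gram
def detect_ngram_repeat_py (token_ids : List Int) (n : Int) : Bool :=
  if (token_ids.length : Int) < n * 3 then false
  else
    let last_ngram := PySem.List.slice token_ids (some (-n)) none
    let count := (PySem.List.pyRange 0 ((token_ids.length : Int) - n) 1).foldl
      (fun count i =>
        if PySem.List.slice token_ids (some i) (some (i + n)) == last_ngram then count + 1
        else count) (0 : Int)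
    decide (3 ≤ count)

-- ===== PORT B =====
-- port of B (Shift-And): Python's nonnegative mask/state ints are ported as Nat (same
-- values); pattern[j] (in range under Pre_ and the guard) is ported via pyGetD.
def detect_ngram_repeat_py_alt (token_ids : List Int) (n : Int) : Bool :=
  if (token_ids.length : Int) < n * 3 then false
  else
    let pattern := PySem.List.slice token_ids (some (-n)) none
    let masks := (PySem.List.pyRange 0 n 1).foldl
      (fun d j =>
        let tok := PySem.List.pyGetD pattern j 0
        d.insert tok ((d.getD tok 0) ||| ((1 : Nat) <<< j.toNat)))
      (PySem.Dict.empty : PySem.Dict Int Nat)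
    let accept : Nat := (1 : Nat) <<< (n - 1).toNat
    let r := (PySem.List.slice token_ids none (some (-1))).foldl
      (fun (sc : Nat × Int) tok =>
        let st := ((sc.1 <<< 1) ||| 1) &&& masks.getD tok 0
        (st, if st &&& accept ≠ 0 then sc.2 + 1 else sc.2))
      ((0 : Nat), (0 : Int))
    decide (3 ≤ r.2)

-- ===== PRECONDITION & SPEC =====
-- Pre_ excludes non-positive n, outside the natural n-gram domain: there A's empty-window
-- slice comparisons yield accidental values while B's shift `1 << (n-1)` raises ValueError.
def Pre_detect_ngram_repeat_py (token_ids : List Int) (n : Int) : Prop := 1 ≤ n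
instance (token_ids : List Int) (n : Int) : Decidable (Pre_detect_ngram_repeat_py token_ids n) := by unfold Pre_detect_ngram_repeat_py; infer_instance
def pvWitness_detect_ngram_repeat_py : List Int × Int := ([5, 7, 5, 7, 5, 7, 5], 2)
def Spec_detect_ngram_repeat_py (token_ids : List Int) (n : Int) (out : Bool) : Prop := out = detect_ngram_repeat_py_alt token_ids n
instance (token_ids : List Int) (n : Int) (out : Bool) : Decidable (Spec_detect_ngram_repeat_py token_ids n out) := by unfold Spec_detect_ngram_repeat_py; infer_instance

-- ===== CLAIM (what is proved, stated in full; the proofs are below) =====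
def Claim_equal_detect_ngram_repeat_py : Prop := ∀ (token_ids : List Int) (n : Int), Dom_detect_ngram_repeat_py token_ids n → Pre_detect_ngram_repeat_py token_ids n → Spec_detect_ngram_repeat_py token_ids n (detect_ngram_repeat_py token_ids n)

-- ===== LEMMAS AND PROOFS =====

-- bit j of (1 <<< m) is set exactly at j = m
lemma pv_testBit_one_shift (m j : Nat) : ((1 : Nat) <<< m).testBit j = decide (m = j) := by
  rw [Nat.shiftLeft_eq, one_mul, Nat.testBit_two_pow]

-- the mask-building fold: bit j of masks[tok] is set iff pattern[j] = tok (j < m)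
lemma pv_mask_bits (pattern : List Int) : ∀ (m : Nat) (d : PySem.Dict Int Nat) (tok : Int) (j : Nat),
    (((List.range m).foldl
        (fun d k => d.insert (pattern.getD k 0)
          ((d.getD (pattern.getD k 0) 0) ||| ((1 : Nat) <<< k))) d).getD tok 0).testBit j = true
      ↔ ((j < m ∧ pattern.getD j 0 = tok) ∨ (d.getD tok 0).testBit j = true) := by
  intro m
  induction m with
  | zero => intro d tok j; simp
  | succ m ih =>
    intro d tok j
    rw [List.range_succ, List.foldl_append, List.foldl_cons, List.foldl_nil]
    rw [PySem.Dict.getD_insert]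
    by_cases htok : tok = pattern.getD m 0
    · subst htok
      rw [if_pos rfl, Nat.testBit_or, pv_testBit_one_shift, Bool.or_eq_true]
      rw [ih]
      rw [decide_eq_true_eq]
      constructor
      · rintro (h | h)
        · exact Or.imp_left (fun ⟨hj, he⟩ => ⟨Nat.lt_succ_of_lt hj, he⟩) h
        · exact Or.inl ⟨by omega, by rw [← h]⟩
      · rintro (⟨hj, he⟩ | h)
        · rcases Nat.lt_succ_iff_lt_or_eq.mp hj with hj' | rfl
          · exact Or.inl (Or.inl ⟨hj', he⟩)
          · exact Or.inr rfl
        · exact Or.inl (Or.inr h)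
    · rw [if_neg htok]
      rw [ih]
      constructor
      · rintro (⟨hj, he⟩ | h)
        · exact Or.inl ⟨Nat.lt_succ_of_lt hj, he⟩
        · exact Or.inr h
      · rintro (⟨hj, he⟩ | h)
        · rcases Nat.lt_succ_iff_lt_or_eq.mp hj with hj' | rfl
          · exact Or.inl ⟨hj', he⟩
          · exact absurd he.symm htok
        · exact Or.inr h

-- extending the processed text by one token: which pattern prefixes are suffixes now
lemma pv_take_suffix_append (pattern s : List Int) (tok : Int) (j : Nat)
    (hj : j < pattern.length) :
    (pattern.take (j+1) <:+ s ++ [tok]) ↔ (pattern.getD j 0 = tok ∧ pattern.take j <:+ s) := by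
  have htake : pattern.take (j+1) = pattern.take j ++ [pattern.getD j 0] := by
    rw [List.take_add_one, List.getElem?_eq_getElem hj, List.getD_eq_getElem?_getD,
        List.getElem?_eq_getElem hj]
    rfl
  rw [htake, List.suffix_concat_iff]
  constructor
  · rintro (hnil | ⟨t, ht, hts⟩)
    · exact absurd hnil (by simp)
    · rcases List.append_inj' ht rfl with ⟨h1, h2⟩
      exact ⟨List.singleton_inj.mp h2, h1 ▸ hts⟩
  · rintro ⟨he, hs⟩
    exact Or.inr ⟨pattern.take j, by rw [he], hs⟩

-- accept test: state & (1 << (N-1)) ≠ 0 reads bit N-1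
lemma pv_accept_iff (st : Nat) (m : Nat) :
    (st &&& ((1 : Nat) <<< m) ≠ 0) ↔ st.testBit m = true := by
  rw [Nat.shiftLeft_eq, one_mul, Nat.and_two_pow]
  rcases h : st.testBit m
  · simp
  · simp

-- the Shift-And scan counts exactly the end positions where the pattern is a suffix
lemma pv_scan_count (N : Nat) (pattern : List Int) (hlen : pattern.length = N) (hN : 1 ≤ N)
    (masks : PySem.Dict Int Nat)
    (hmask : ∀ tok j, (masks.getD tok 0).testBit j = true ↔ (j < N ∧ pattern.getD j 0 = tok)) :
    ∀ (text s : List Int) (st : Nat) (c : Int),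
      (∀ j, st.testBit j = true ↔ (j < N ∧ pattern.take (j+1) <:+ s)) →
      (text.foldl (fun (sc : Nat × Int) tok =>
          let st' := ((sc.1 <<< 1) ||| 1) &&& masks.getD tok 0
          (st', if st' &&& ((1 : Nat) <<< (N-1)) ≠ 0 then sc.2 + 1 else sc.2)) (st, c)).2
        = c + ((List.range text.length).countP
            (fun k => decide (pattern <:+ s ++ text.take (k+1))) : Int) := by
  intro text
  induction text with
  | nil => intro s st c _; simp
  | cons tok rest ih =>
    intro s st c hst
    have hstep : ∀ j, ((((st <<< 1) ||| 1) &&& masks.getD tok 0).testBit j = true)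
        ↔ (j < N ∧ pattern.take (j+1) <:+ s ++ [tok]) := by
      intro j
      rw [Nat.testBit_and, Nat.testBit_or, Nat.testBit_shiftLeft, Bool.and_eq_true,
        Bool.or_eq_true, Bool.and_eq_true, decide_eq_true_eq, hmask]
      constructor
      · rintro ⟨hpre, hjN, he⟩
        refine ⟨hjN, (pv_take_suffix_append pattern s tok j (by omega)).mpr ⟨he, ?_⟩⟩
        rcases hpre with ⟨h1, hbit⟩ | h0
        · have h2 := ((hst (j-1)).mp hbit).2
          rwa [Nat.sub_add_cancel h1] at h2
        · have h1 := pv_testBit_one_shift 0 j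
          rw [Nat.shiftLeft_zero] at h1
          rw [h0] at h1
          have hj0 : 0 = j := by simpa using h1.symm
          simp [← hj0]
      · rintro ⟨hjN, hsfx⟩
        obtain ⟨he, hs⟩ := (pv_take_suffix_append pattern s tok j (by omega)).mp hsfx
        refine ⟨?_, hjN, he⟩
        rcases Nat.eq_zero_or_pos j with rfl | hj
        · exact Or.inr (by decide)
        · exact Or.inl ⟨hj, (hst (j-1)).mpr ⟨by omega, by rwa [Nat.sub_add_cancel hj]⟩⟩
    rw [List.foldl_cons]
    simp only []
    rw [ih (s ++ [tok]) _ _ hstep]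
    have hacc : (((st <<< 1) ||| 1) &&& masks.getD tok 0) &&& ((1 : Nat) <<< (N-1)) ≠ 0
        ↔ pattern <:+ s ++ [tok] := by
      rw [pv_accept_iff, hstep (N-1)]
      have : (N - 1) + 1 = N := by omega
      rw [this]
      rw [show pattern.take N = pattern from by rw [← hlen]; exact List.take_length]
      constructor
      · exact fun h => h.2
      · exact fun h => ⟨by omega, h⟩
    have hcnt : (List.range (tok :: rest).length).countP
          (fun k => decide (pattern <:+ s ++ (tok :: rest).take (k+1)))
        = (if pattern <:+ s ++ [tok] then 1 else 0)
          + (List.range rest.length).countP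
              (fun k => decide (pattern <:+ (s ++ [tok]) ++ rest.take (k+1))) := by
      rw [List.length_cons, List.range_succ_eq_map, List.countP_cons, List.countP_map]
      have h0 : (decide (pattern <:+ s ++ (tok :: rest).take (0+1))) = decide (pattern <:+ s ++ [tok]) := by
        simp
      have h1 : ∀ k, ((fun k => decide (pattern <:+ s ++ (tok :: rest).take (k+1))) ∘ Nat.succ) k
          = decide (pattern <:+ (s ++ [tok]) ++ rest.take (k+1)) := by
        intro k
        simp [List.append_assoc]
      rw [List.countP_congr (fun k _ => by rw [h1 k]), h0]
      rcases h : decide (pattern <:+ s ++ [tok])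
      · rw [decide_eq_false_iff_not] at h
        simp [h]
      · rw [decide_eq_true_eq] at h
        simp [h]
        ring
    split
    · rename_i h
      rw [hcnt, if_pos (hacc.mp h)]
      push_cast
      ring
    · rename_i h
      rw [hcnt, if_neg (fun hx => h (hacc.mpr hx))]
      push_cast
      ring

-- a window of length N matching at end position k+1 is the same as the window slice matching
lemma pv_suffix_iff_window (l pattern : List Int) (N k : Nat) (hlen : pattern.length = N)
    (hk : k + 1 ≤ l.length) :
    (pattern <:+ l.take (k+1)) ↔ (N ≤ k + 1 ∧ (l.drop (k+1-N)).take N = pattern) := by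
  constructor
  · intro h
    have hle : N ≤ k + 1 := by
      have := h.length_le
      rw [hlen, List.length_take] at this
      omega
    refine ⟨hle, ?_⟩
    have := List.suffix_iff_eq_drop.mp h
    rw [List.length_take, hlen] at this
    have hmin : min (k+1) l.length = k + 1 := by omega
    rw [hmin, List.drop_take] at this
    have : pattern = (l.drop (k+1-N)).take N := by
      rw [this]; congr 1; omega
    exact this.symm
  · rintro ⟨hle, hw⟩
    rw [List.suffix_iff_eq_drop, List.length_take, hlen]
    have hmin : min (k+1) l.length = k + 1 := by omega
    rw [hmin, List.drop_take, ← hw]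
    congr 1
    omega

-- the two counts agree: windows of A vs accepting end positions of B's scan
lemma pv_count_eq (l pattern : List Int) (N : Nat) (hlen : pattern.length = N)
    (hN : 1 ≤ N) (hNL : N ≤ l.length) :
    (List.range (l.length - 1)).countP
        (fun k => decide (pattern <:+ [] ++ l.dropLast.take (k+1)))
      = (List.range (l.length - N)).countP (fun k => (l.drop k).take N == pattern) := by
  have hL1 : 1 ≤ l.length := le_trans hN hNL
  have step1 : (List.range (l.length - 1)).countP
        (fun k => decide (pattern <:+ [] ++ l.dropLast.take (k+1)))
      = (List.range (l.length - 1)).countP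
        (fun k => decide (N ≤ k + 1 ∧ (l.drop (k+1-N)).take N = pattern)) := by
    apply List.countP_congr
    intro k hk
    rw [List.mem_range] at hk
    rw [decide_eq_true_eq, decide_eq_true_eq, List.nil_append, List.dropLast_eq_take,
      List.take_take]
    have hmin : min (k+1) (l.length - 1) = k + 1 := by omega
    rw [hmin]
    exact pv_suffix_iff_window l pattern N k hlen (by omega)
  rw [step1]
  have hsplit : l.length - 1 = (N - 1) + (l.length - N) := by omega
  rw [hsplit, List.range_add, List.countP_append, List.countP_map]
  have hzero : (List.range (N - 1)).countP
      (fun k => decide (N ≤ k + 1 ∧ (l.drop (k+1-N)).take N = pattern)) = 0 := by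
    rw [List.countP_eq_zero]
    intro k hk
    rw [List.mem_range] at hk
    simp only [decide_eq_true_eq]
    rintro ⟨h1, -⟩
    omega
  rw [hzero, Nat.zero_add]
  apply List.countP_congr
  intro k hk
  rw [List.mem_range] at hk
  simp only [Function.comp_apply, decide_eq_true_eq, beq_iff_eq]
  have h1 : (N - 1) + k + 1 - N = k := by omega
  have h2 : N ≤ (N - 1) + k + 1 := by omega
  rw [h1]
  constructor
  · rintro ⟨-, h⟩; exact h
  · intro h; exact ⟨h2, h⟩

-- ===== VERDICT (by name: the statement is the Claim_ definition above) =====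
theorem detect_ngram_repeat_py_spec : Claim_equal_detect_ngram_repeat_py := by
  intro token_ids n _ hn
  unfold Spec_detect_ngram_repeat_py detect_ngram_repeat_py detect_ngram_repeat_py_alt
  by_cases hguard : (token_ids.length : Int) < n * 3
  · rw [if_pos hguard, if_pos hguard]
  · have hn1 : (1 : Int) ≤ n := hn
    obtain ⟨N, hNn⟩ : ∃ N : Nat, (N : Int) = n := ⟨n.toNat, Int.toNat_of_nonneg (by omega)⟩
    have hg : n * 3 ≤ (token_ids.length : Int) := Int.not_lt.mp hguard
    have hN1 : 1 ≤ N := by omega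
    have hNL : 3 * N ≤ token_ids.length := by
      rw [← hNn] at hg
      have h3 : N * 3 ≤ token_ids.length := by exact_mod_cast hg
      omega
    have hNle : N ≤ token_ids.length := by omega
    simp only [if_neg hguard]
    -- identify the pattern
    rw [← hNn, PySem.List.slice_from_neg_natCast token_ids N (by omega)]
    set pattern := token_ids.drop (token_ids.length - N) with hpat
    have hplen : pattern.length = N := by
      rw [hpat, List.length_drop]; omega
    -- A's loop is a countP over the window indices
    have hsub : (token_ids.length : Int) - (N : Int) = ((token_ids.length - N : Nat) : Int) := by
      omega
    rw [hsub, PySem.List.foldl_if_add_one, PySem.List.pyRange_zero_natCast, List.countP_map]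
    have hAcnt : (List.range (token_ids.length - N)).countP
          ((fun i => PySem.List.slice token_ids (some i) (some (i + (N:Int))) == pattern) ∘ (fun k : Nat => (k : Int)))
        = (List.range (token_ids.length - N)).countP (fun k => (token_ids.drop k).take N == pattern) := by
      apply List.countP_congr
      intro k _
      simp only [Function.comp_apply, PySem.List.slice_natCast_add]
    rw [hAcnt]
    -- B's masks satisfy the bit characterisation
    rw [PySem.List.pyRange_zero_natCast, List.foldl_map]
    simp only [PySem.List.pyGetD_natCast, Int.toNat_natCast]
    have hmask : ∀ (tok : Int) (j : Nat),
        (((List.range N).foldl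
            (fun d k => d.insert (pattern.getD k 0)
              ((d.getD (pattern.getD k 0) 0) ||| ((1 : Nat) <<< k)))
            (PySem.Dict.empty : PySem.Dict Int Nat)).getD tok 0).testBit j = true
          ↔ (j < N ∧ pattern.getD j 0 = tok) := by
      intro tok j
      rw [pv_mask_bits]
      simp [PySem.Dict.getD_empty, Nat.zero_testBit]
    -- the accept bit and the text
    have hacc : ((N : Int) - 1).toNat = N - 1 := by omega
    rw [hacc, PySem.List.slice_to_neg_one]
    -- run the scan lemma from the empty processed prefix
    have hinit : ∀ j : Nat, (0 : Nat).testBit j = true ↔ (j < N ∧ pattern.take (j+1) <:+ []) := by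
      intro j
      rw [Nat.zero_testBit]
      constructor
      · intro h; exact (Bool.false_ne_true h).elim
      intro hrhs
      exfalso
      obtain ⟨-, hsfx⟩ := hrhs
      have := List.suffix_nil.mp hsfx
      have hne : pattern ≠ [] := by
        intro h; rw [h] at hplen; simp at hplen; omega
      rw [List.take_eq_nil_iff] at this
      rcases this with h | h
      · omega
      · exact hne h
    rw [pv_scan_count N pattern hplen hN1 _ hmask token_ids.dropLast [] 0 0 hinit]
    rw [List.length_dropLast]
    rw [pv_count_eq token_ids pattern N hplen hN1 hNle]
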